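-- pv_equiv track=rewrite | github.com/Zzzzzuz/qa_test_task | script_comparison.py | find_difference_elem
-- ===== SOURCE A (Python) =====
-- def find_difference_elem(l1, l2):
--     list_disagreements = []
--
--     for i_error, row_error in enumerate(l1):
--         for i_correct, row_correct in enumerate(l2):
--             if i_error == i_correct and row_error != row_correct:
--
--                 for i, el_row_error in enumerate(row_error):
--                     for j, el_row_correct in enumerate(row_correct):
--                         if i == j and el_row_error != el_row_correct:
--                             rep = i_error + 1, l1[0][i], el_row_error, el_row_correct
--                             list_disagreements.append(rep)
--
--     return list_disagreements if len(list_disagreements) > 1 else None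
-- ===== SOURCE B (Python) =====
-- def find_difference_elem(l1, l2):
--     out = [
--         (k + 1, l1[0][i], a, b)
--         for k, (r1, r2) in enumerate(zip(l1, l2))
--         for i, (a, b) in enumerate(zip(r1, r2))
--         if a != b
--     ]
--     return out if len(out) > 1 else None
-- ===== Notes on version B (the rewrite author's own statement) =====
-- stated objective: faster
-- what changed: A scans all row pairs and all element pairs and keeps only the equal-index ones (four nested loops); B zips the two lists and each aligned row pair and collects mismatches in one comprehension over matching indices only.
import Mathlib
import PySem

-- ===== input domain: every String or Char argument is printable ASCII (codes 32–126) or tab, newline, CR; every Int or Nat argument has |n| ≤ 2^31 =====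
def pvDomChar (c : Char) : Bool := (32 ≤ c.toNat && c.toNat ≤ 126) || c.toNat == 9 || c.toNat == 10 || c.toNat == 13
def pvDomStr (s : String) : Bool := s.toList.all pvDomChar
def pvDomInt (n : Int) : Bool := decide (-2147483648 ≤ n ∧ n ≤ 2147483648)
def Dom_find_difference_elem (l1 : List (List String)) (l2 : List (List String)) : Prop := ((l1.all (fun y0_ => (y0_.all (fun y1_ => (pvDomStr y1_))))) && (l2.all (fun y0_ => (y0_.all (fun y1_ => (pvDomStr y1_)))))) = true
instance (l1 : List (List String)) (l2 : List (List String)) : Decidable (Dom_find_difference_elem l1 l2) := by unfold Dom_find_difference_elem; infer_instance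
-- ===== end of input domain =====

-- B replaces A's four nested index-matching loops by a single comprehension over zipped
-- rows and zipped elements (objective: faster, O(n·m) instead of O(n²·m²)).

-- l1[0][i] (total form; Pre_ guarantees the access is in range where it is evaluated)
def pvHdr (l1 : List (List String)) (i : Int) : String :=
  PySem.List.pyGetD (PySem.List.pyGetD l1 0 []) i ""

-- ===== PORT A =====
def find_difference_elem (l1 : List (List String)) (l2 : List (List String)) : Option (List (Int × String × String × String)) :=
  let ld := (PySem.List.enumerate l1 0).foldl (fun acc p =>
    (PySem.List.enumerate l2 0).foldl (fun acc q =>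
      if p.1 = q.1 ∧ p.2 ≠ q.2 then
        (PySem.List.enumerate p.2 0).foldl (fun acc r =>
          (PySem.List.enumerate q.2 0).foldl (fun acc s =>
            if r.1 = s.1 ∧ r.2 ≠ s.2 then
              acc ++ [(p.1 + 1, pvHdr l1 r.1, r.2, s.2)]
            else acc) acc) acc
      else acc) acc) []
  if ld.length > 1 then some ld else none

-- ===== PORT B =====
def find_difference_elem_alt (l1 : List (List String)) (l2 : List (List String)) : Option (List (Int × String × String × String)) :=
  let out := (PySem.List.enumerate (l1.zip l2) 0).flatMap (fun p =>
    (PySem.List.enumerate (p.2.1.zip p.2.2) 0).flatMap (fun q =>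
      if q.2.1 ≠ q.2.2 then [(p.1 + 1, pvHdr l1 q.1, q.2.1, q.2.2)] else []))
  if out.length > 1 then some out else none

-- ===== PRECONDITION & SPEC =====
-- Pre_ excludes exactly the inputs on which Python A raises IndexError: a pair of aligned
-- rows with an element mismatch at a position i that is out of range for the header row l1[0].
def Pre_find_difference_elem (l1 : List (List String)) (l2 : List (List String)) : Prop :=
  ∀ p ∈ l1.zip l2, ∀ q ∈ PySem.List.enumerate (p.1.zip p.2) 0,
    q.2.1 ≠ q.2.2 → q.1 < ((l1.headD []).length : Int)
instance (l1 : List (List String)) (l2 : List (List String)) : Decidable (Pre_find_difference_elem l1 l2) := by unfold Pre_find_difference_elem; infer_instance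

def pvWitness_find_difference_elem : List (List String) × List (List String) :=
  ([["a", "b"], ["c", "d"]], [["a", "x"], ["c", "y"]])

def Spec_find_difference_elem (l1 : List (List String)) (l2 : List (List String)) (out : Option (List (Int × String × String × String))) : Prop := out = find_difference_elem_alt l1 l2
instance (l1 : List (List String)) (l2 : List (List String)) (out : Option (List (Int × String × String × String))) : Decidable (Spec_find_difference_elem l1 l2 out) := by unfold Spec_find_difference_elem; infer_instance

-- ===== CLAIM (what is proved, stated in full; the proofs are below) =====
def Claim_equal_find_difference_elem : Prop := ∀ (l1 : List (List String)) (l2 : List (List String)), Dom_find_difference_elem l1 l2 → Pre_find_difference_elem l1 l2 → Spec_find_difference_elem l1 l2 (find_difference_elem l1 l2)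

-- ===== LEMMAS AND PROOFS =====

-- 'if c then acc ++ u else acc' as an append, so foldl_append_eq_flatMap applies
theorem pv_ite_append {β : Type} (c : Prop) [Decidable c] (acc u : List β) :
    (if c then acc ++ u else acc) = acc ++ (if c then u else []) := by
  split_ifs <;> simp

-- keys of 'enumerate v s' are all ≥ s, so a key i < s never matches
theorem pv_sel_lt {γ β : Type} (v : List γ) (s i : Int) (hi : i < s)
    (f : Int × γ → List β) :
    (PySem.List.enumerate v s).flatMap (fun q => if i = q.1 then f q else []) = [] := by
  induction v generalizing s with
  | nil => simp [PySem.List.enumerate_nil]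
  | cons y v ih =>
      rw [PySem.List.enumerate_cons]
      simp only [List.flatMap_cons]
      rw [if_neg (by omega), ih (s + 1) (by omega)]
      simp

-- the diagonal of a double enumerate-match is the enumerate of the zip
theorem pv_diag {γ β : Type} (u v : List γ) (s : Int)
    (f : Int → γ → γ → List β) :
    (PySem.List.enumerate u s).flatMap (fun p =>
      (PySem.List.enumerate v s).flatMap (fun q =>
        if p.1 = q.1 then f p.1 p.2 q.2 else []))
    = (PySem.List.enumerate (u.zip v) s).flatMap (fun p => f p.1 p.2.1 p.2.2) := by
  induction u generalizing v s with
  | nil => simp [PySem.List.enumerate_nil]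
  | cons x u ih =>
      cases v with
      | nil =>
          simp only [PySem.List.enumerate_nil, List.zip_nil_right, List.flatMap_nil]
          rw [PySem.List.enumerate_cons]
          simp
      | cons y v =>
          rw [List.zip_cons_cons, PySem.List.enumerate_cons x, PySem.List.enumerate_cons y,
            PySem.List.enumerate_cons (x, y)]
          simp only [List.flatMap_cons]
          rw [pv_sel_lt v (s + 1) s (by omega) (fun q => f s x q.2)]
          have hskip : (PySem.List.enumerate u (s + 1)).flatMap (fun p =>
              (if p.1 = s then f p.1 p.2 y else []) ++
                (PySem.List.enumerate v (s + 1)).flatMap (fun q =>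
                  if p.1 = q.1 then f p.1 p.2 q.2 else []))
              = (PySem.List.enumerate u (s + 1)).flatMap (fun p =>
              (PySem.List.enumerate v (s + 1)).flatMap (fun q =>
                if p.1 = q.1 then f p.1 p.2 q.2 else [])) := by
            apply List.flatMap_congr
            intro p hp
            rcases (PySem.List.mem_enumerate_iff u (s + 1) p).1 hp with ⟨k, hk, rfl⟩
            rw [if_neg (by simp; omega)]
            simp
          rw [hskip, ih v (s + 1)]
          simp

-- on the zip of a list with itself every pair is equal, so the mismatch body vanishes
theorem pv_zip_self {γ β : Type} (r : List γ) (s : Int)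
    (f : Int → γ → γ → List β) (hf : ∀ i a, f i a a = []) :
    (PySem.List.enumerate (r.zip r) s).flatMap (fun q => f q.1 q.2.1 q.2.2) = [] := by
  induction r generalizing s with
  | nil => simp [PySem.List.enumerate_nil]
  | cons x r ih =>
      rw [List.zip_cons_cons, PySem.List.enumerate_cons]
      simp only [List.flatMap_cons, hf]
      rw [ih (s + 1)]
      simp

-- both cores compute the same list of disagreements
theorem pv_core_eq (l1 l2 : List (List String)) :
    (PySem.List.enumerate l1 0).foldl (fun acc p =>
      (PySem.List.enumerate l2 0).foldl (fun acc q =>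
        if p.1 = q.1 ∧ p.2 ≠ q.2 then
          (PySem.List.enumerate p.2 0).foldl (fun acc r =>
            (PySem.List.enumerate q.2 0).foldl (fun acc s =>
              if r.1 = s.1 ∧ r.2 ≠ s.2 then
                acc ++ [(p.1 + 1, pvHdr l1 r.1, r.2, s.2)]
              else acc) acc) acc
        else acc) acc) []
    = (PySem.List.enumerate (l1.zip l2) 0).flatMap (fun p =>
      (PySem.List.enumerate (p.2.1.zip p.2.2) 0).flatMap (fun q =>
        if q.2.1 ≠ q.2.2 then [(p.1 + 1, pvHdr l1 q.1, q.2.1, q.2.2)] else [])) := by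
  -- turn all the folds into flatMaps
  simp only [pv_ite_append, PySem.List.foldl_append_eq_flatMap]
  simp only [List.nil_append]
  -- normalise 'if a ∧ b then u else []' to nested ifs
  have hsplit : ∀ (a b : Prop) [Decidable a] [Decidable b]
      (u : List (Int × String × String × String)),
      (if a ∧ b then u else []) = (if a then (if b then u else []) else []) := by
    intro a b _ _ u; split_ifs <;> tauto
  simp only [hsplit]
  -- collapse the element-level double loop to a loop over the zip
  have hinner : ∀ (re rc : List String) (ie : Int),
      (PySem.List.enumerate re 0).flatMap (fun r =>
        (PySem.List.enumerate rc 0).flatMap (fun s =>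
          if r.1 = s.1 then (if r.2 ≠ s.2 then
            [(ie + 1, pvHdr l1 r.1, r.2, s.2)] else []) else []))
      = (PySem.List.enumerate (re.zip rc) 0).flatMap (fun q =>
          if q.2.1 ≠ q.2.2 then [(ie + 1, pvHdr l1 q.1, q.2.1, q.2.2)] else []) := by
    intro re rc ie
    exact pv_diag re rc 0 (fun i a b =>
      if a ≠ b then [(ie + 1, pvHdr l1 i, a, b)] else [])
  simp only [hinner]
  -- collapse the row-level double loop to a loop over the zip
  rw [pv_diag l1 l2 0 (fun k r1 r2 =>
    if r1 ≠ r2 then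
      (PySem.List.enumerate (r1.zip r2) 0).flatMap (fun q =>
        if q.2.1 ≠ q.2.2 then [(k + 1, pvHdr l1 q.1, q.2.1, q.2.2)] else [])
    else [])]
  -- drop the redundant row-inequality guard: on equal rows the zip has no mismatches
  apply List.flatMap_congr
  intro p _
  by_cases h : p.2.1 = p.2.2
  · rw [if_neg (not_not_intro h)]
    rw [h]
    exact (pv_zip_self p.2.2 0
      (fun i a b => if a ≠ b then [(p.1 + 1, pvHdr l1 i, a, b)] else [])
      (by intro i a; simp)).symm
  · rw [if_pos h]

-- ===== VERDICT (by name: the statement is the Claim_ definition above) =====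
theorem find_difference_elem_spec : Claim_equal_find_difference_elem := by
  intro l1 l2 _ _
  unfold Spec_find_difference_elem find_difference_elem find_difference_elem_alt
  rw [pv_core_eq]
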